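-- pv_equiv track=rewrite | github.com/Sciborgue/Misc_problem_solving | R1013B_team_training.py | team_a_team
-- ===== SOURCE A (Python) =====
-- def team_a_team(list_a, x):
--     result = 0
--     if len(list_a) == 0:
--         return 0
--     a_test = list_a[:]
--     while a_test:
--         test_list = []
--         score = 0
--         while score < x:
--             if len(a_test) == 0:
--                 result = 0
--                 break
--             mi = min(a_test)
--             test_list.append(mi)
--             a_test.remove(mi)
--             score = min(test_list) * len(test_list)
--         if score >= x:
--             result += 1
--     if result == 0:
--         list_a_copy = list_a[:]
--         list_a_copy.remove(min(list_a_copy))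
--         return team_a_team(list_a_copy, x)
--     else:
--         return result
-- ===== SOURCE B (Python) =====
-- def team_a_team(list_a, x):
--     a = sorted(list_a)
--     n = len(a)
--     for s in range(n):
--         # try to tile the suffix a[s:] exactly into greedy teams
--         i, cnt, ok = s, 0, True
--         while i < n:
--             if a[i] <= 0:
--                 ok = False
--                 break
--             i += -(-x // a[i])
--             cnt += 1
--         if ok and i == n:
--             return cnt
--     return 0
-- ===== Notes on version B (the rewrite author's own statement) =====
-- stated objective: faster
-- what changed: B sorts the list once and, for each candidate start index, checks an exact tiling by jumping ceil(x/a[i]) positions per team, instead of A's repeated min()+remove() scans and full re-runs after dropping the minimum.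
import Mathlib
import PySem

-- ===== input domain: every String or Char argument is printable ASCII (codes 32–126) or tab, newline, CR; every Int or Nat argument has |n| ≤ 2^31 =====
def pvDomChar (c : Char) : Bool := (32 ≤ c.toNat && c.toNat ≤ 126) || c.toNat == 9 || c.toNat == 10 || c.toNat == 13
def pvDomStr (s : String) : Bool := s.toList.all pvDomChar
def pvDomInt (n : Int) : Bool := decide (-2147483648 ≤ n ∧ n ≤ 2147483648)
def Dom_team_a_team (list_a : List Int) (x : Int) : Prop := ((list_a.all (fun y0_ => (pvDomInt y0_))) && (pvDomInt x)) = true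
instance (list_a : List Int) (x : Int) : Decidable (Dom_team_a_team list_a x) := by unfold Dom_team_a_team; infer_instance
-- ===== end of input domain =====

-- B replaces A's repeated min/remove scans by one sort followed by index-jump tiling attempts; measurably faster.


-- ===== PORT A =====
-- inner while loop of A: state (test_list, a_test, score); returns (score, test_list, a_test, broke?)
def innerA (x : Int) : Nat → List Int → List Int → Int → (Int × List Int × List Int × Bool)
  | 0, test, a, score => (score, test, a, false)
  | fuel+1, test, a, score =>
    if score < x then
      if a = [] then (score, test, a, true)
      else
        let mi := (PySem.List.min? a (fun y => y)).getD 0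
        let test' := test ++ [mi]
        let a' := (PySem.List.remove? a mi).getD a
        let score' := ((PySem.List.min? test' (fun y => y)).getD 0) * (test'.length : Int)
        innerA x fuel test' a' score'
    else (score, test, a, false)

-- outer while loop of A
def outerA (x : Int) : Nat → List Int → Int → Int
  | 0, _, result => result
  | fuel+1, aTest, result =>
    if aTest = [] then result
    else
      let r := innerA x (aTest.length + 1) [] aTest 0
      let result1 := if r.2.2.2 then 0 else result
      let result2 := if r.1 ≥ x then result1 + 1 else result1
      outerA x fuel r.2.2.1 result2

def team_a_team (list_a : List Int) (x : Int) : Int :=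
  if h : list_a.length = 0 then 0
  else
    let r := outerA x (list_a.length + 1) list_a 0
    if r = 0 then
      let mi := (PySem.List.min? list_a (fun y => y)).getD 0
      team_a_team ((PySem.List.remove? list_a mi).getD list_a) x
    else r
termination_by list_a.length
decreasing_by
  have hne : list_a ≠ [] := by intro hnil; simp [hnil] at h
  have hmem : (PySem.List.min? list_a (fun y => y)).getD 0 ∈ list_a := by
    rcases hmin : PySem.List.min? list_a (fun y => y) with _ | v
    · exact absurd ((PySem.List.min?_eq_none_iff _ _).mp hmin) hne
    · simpa using PySem.List.min?_mem hmin
  simp only [PySem.List.remove?_eq_some_erase _ _ hmem, Option.getD_some]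
  have := List.length_erase_of_mem hmem
  have : list_a.length ≠ 0 := h
  omega

-- ===== PORT B =====
-- inner while loop of B: state (i, cnt); third component is False exactly when the loop hit `break`
def tileAlt (a : List Int) (x : Int) : Nat → Int → Int → (Int × Int × Bool)
  | 0, i, cnt => (i, cnt, true)
  | fuel+1, i, cnt =>
    if i < (a.length : Int) then
      let ai := (PySem.List.pyGet? a i).getD 0
      if ai ≤ 0 then (i, cnt, false)
      else tileAlt a x fuel (i + (-(PySem.Int.floordiv (-x) ai))) (cnt + 1)
    else (i, cnt, true)

-- `for s in range(n)` loop of B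
def scanAlt (a : List Int) (x : Int) : List Int → Int
  | [] => 0
  | s :: rest =>
    let r := tileAlt a x (a.length + 1) s 0
    if r.2.2 = true ∧ r.1 = (a.length : Int) then r.2.1 else scanAlt a x rest

def team_a_team_alt (list_a : List Int) (x : Int) : Int :=
  let a := PySem.List.sorted list_a (fun y => y) false
  scanAlt a x (PySem.List.pyRange 0 (a.length : Int) 1)

-- ===== PRECONDITION & SPEC =====
-- A never terminates when x ≤ 0 and the list is nonempty (each team closes immediately with score 0 ≥ x
-- and removes nobody), so Pre_ excludes exactly those inputs; everywhere A returns, Pre_ holds.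
def Pre_team_a_team (list_a : List Int) (x : Int) : Prop := list_a = [] ∨ 1 ≤ x
instance (list_a : List Int) (x : Int) : Decidable (Pre_team_a_team list_a x) := by
  unfold Pre_team_a_team; infer_instance

def pvWitness_team_a_team : List Int × Int := ([3, 1, 2, 2, 7, 1], 6)

def Spec_team_a_team (list_a : List Int) (x : Int) (out : Int) : Prop := out = team_a_team_alt list_a x
instance (list_a : List Int) (x : Int) (out : Int) : Decidable (Spec_team_a_team list_a x out) := by
  unfold Spec_team_a_team; infer_instance

-- ===== CLAIM (what is proved, stated in full; the proofs are below) =====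
def Claim_equal_team_a_team : Prop := ∀ (list_a : List Int) (x : Int), Dom_team_a_team list_a x → Pre_team_a_team list_a x → Spec_team_a_team list_a x (team_a_team list_a x)

-- ===== LEMMAS AND PROOFS =====

-- ceiling division ceil(x / m) as B computes it: -((-x) // m)
def ceilK (x m : Int) : Int := -(PySem.Int.floordiv (-x) m)

-- spec of one greedy tiling attempt on a sorted pool: number of teams, none = no exact tiling
def tileSpec (x : Int) : List Int → Option Int
  | [] => some 0
  | m :: t =>
    if 1 ≤ m ∧ 1 ≤ ceilK x m ∧ (ceilK x m).toNat ≤ t.length + 1 then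
      (tileSpec x ((m :: t).drop (ceilK x m).toNat)).map (1 + ·)
    else none
termination_by l => l.length
decreasing_by
  rename_i hg
  simp only [List.length_drop, List.length_cons]
  omega

-- result of the whole search: first suffix that tiles exactly
def firstTile (x : Int) (u : List Int) : Int :=
  match h : tileSpec x u with
  | some c => c
  | none => firstTile x u.tail
termination_by u.length
decreasing_by
  cases u with
  | nil => simp [tileSpec] at h
  | cons a t => simp

lemma tileSpec_nil (x : Int) : tileSpec x [] = some 0 := by rw [tileSpec]

lemma firstTile_some {x : Int} {u : List Int} {c : Int} (h : tileSpec x u = some c) :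
    firstTile x u = c := by
  rw [firstTile]; split <;> rename_i h' <;> rw [h'] at h <;> simp_all

lemma firstTile_none {x : Int} {u : List Int} (h : tileSpec x u = none) :
    firstTile x u = firstTile x u.tail := by
  rw [firstTile]; split <;> rename_i h' <;> rw [h'] at h <;> simp_all

lemma firstTile_nil (x : Int) : firstTile x [] = 0 := firstTile_some (tileSpec_nil x)

lemma tileSpec_nonneg (x : Int) : ∀ (u : List Int) (c : Int), tileSpec x u = some c → 0 ≤ c := by
  intro u
  fun_induction tileSpec x u with
  | case1 => intro c h; simp at h; omega
  | case2 m t hg ih =>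
    intro c h
    simp only [tileSpec, if_pos hg, Option.map_eq_some_iff] at h
    obtain ⟨c', hc', rfl⟩ := h
    have := ih c' hc'
    omega
  | case3 m t hg => intro c h; simp [tileSpec, if_neg hg] at h

lemma tileSpec_cons_pos {x : Int} {m : Int} {t : List Int} {c : Int}
    (h : tileSpec x (m :: t) = some c) : 1 ≤ c := by
  rw [tileSpec] at h
  split at h
  · obtain ⟨c', hc', rfl⟩ := Option.map_eq_some_iff.mp h
    have := tileSpec_nonneg x _ c' hc'
    omega
  · simp at h

lemma ceilK_bracket {x m : Int} (hm : 0 < m) : (ceilK x m - 1) * m < x ∧ x ≤ ceilK x m * m :=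
  (PySem.Int.neg_floordiv_neg_eq_iff_of_pos hm).mp rfl

lemma ceilK_pos {x m : Int} (hx : 1 ≤ x) (hm : 1 ≤ m) : 1 ≤ ceilK x m := by
  rcases ceilK_bracket (x := x) (m := m) (by omega) with ⟨h1, h2⟩
  nlinarith

lemma foldl_min_eq (m : Int) (t : List Int) (h : ∀ y ∈ t, m ≤ y) : t.foldl min m = m := by
  induction t with
  | nil => rfl
  | cons a t ih =>
    have : min m a = m := min_eq_left (h a (by simp))
    simp only [List.foldl_cons, this]
    exact ih (fun y hy => h y (by simp [hy]))

lemma min_pairwise_cons (m : Int) (s : List Int) (h : (m :: s).Pairwise (· ≤ ·)) :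
    (PySem.List.min? (m :: s) (fun y => y)).getD 0 = m := by
  rw [PySem.List.min?_id_cons]
  simpa using foldl_min_eq m s (List.pairwise_cons.mp h).1

-- A's `min` + `remove` on a pool whose sorted form is m :: t: the min is m,
-- removal takes erase m, and the remainder sorts to t.
lemma sorted_cons_min (a : List Int) (m : Int) (t : List Int)
    (h : PySem.List.sorted a (fun y => y) false = m :: t) :
    (PySem.List.min? a (fun y => y)).getD 0 = m ∧
    (PySem.List.remove? a m).getD a = a.erase m ∧
    PySem.List.sorted (a.erase m) (fun y => y) false = t := by
  have hane : a ≠ [] := by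
    intro hnil; rw [hnil] at h; simp [PySem.List.sorted] at h
  have hm_mem : m ∈ a := by
    have : m ∈ PySem.List.sorted a (fun y => y) false := by rw [h]; simp
    rwa [PySem.List.mem_sorted] at this
  have hmin : (PySem.List.min? a (fun y => y)).getD 0 = m := by
    rcases hv : PySem.List.min? a (fun y => y) with _ | v
    · exact absurd ((PySem.List.min?_eq_none_iff _ _).mp hv) hane
    · have hvm : v ∈ a := PySem.List.min?_mem hv
      have h1 : v ≤ m := PySem.List.min?_isMin hv m hm_mem
      have h2 : m ≤ v := PySem.List.key_head_sorted_le a (fun y => y) h v hvm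
      simp [le_antisymm h1 h2]
  refine ⟨hmin, by rw [PySem.List.remove?_eq_some_erase _ _ hm_mem, Option.getD_some], ?_⟩
  · apply PySem.List.sorted_id_eq_of_perm_of_pairwise
    · have hperm : (m :: t).Perm a := h ▸ PySem.List.sorted_perm a (fun y => y) false
      have := hperm.erase m
      simpa using this
    · have := PySem.List.sorted_pairwise a (fun y => y)
      rw [h] at this
      exact (List.pairwise_cons.mp this).2

-- key invariant for the inner loop of A, running on a pool whose sorted form is the suffix u.drop j
lemma inner_main (x : Int) (hx : 1 ≤ x) (u : List Int) (m : Int) (t : List Int)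
    (hu : u = m :: t) (hp : u.Pairwise (· ≤ ·)) :
    ∀ n (j : Nat) (a : List Int), j + n = u.length → 1 ≤ j →
      (1 ≤ m → (j : Int) ≤ ceilK x m) →
      PySem.List.sorted a (fun y => y) false = u.drop j →
      ((1 ≤ m ∧ (ceilK x m).toNat ≤ u.length →
        ∃ a', innerA x (a.length + 1) (u.take j) a (m * j) =
                (m * ceilK x m, u.take (ceilK x m).toNat, a', false) ∧
              PySem.List.sorted a' (fun y => y) false = u.drop (ceilK x m).toNat) ∧
       (¬ (1 ≤ m ∧ (ceilK x m).toNat ≤ u.length) →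
        innerA x (a.length + 1) (u.take j) a (m * (j : Int)) = (m * u.length, u, [], true))) := by
  intro n
  induction n with
  | zero =>
    intro j a hjn hj1 hjK hsort
    have hj : j = u.length := by omega
    have ha : a = [] := by
      rw [hj, List.drop_length] at hsort
      exact (PySem.List.sorted_eq_nil_iff _ _ _).mp hsort
    subst ha
    constructor
    · rintro ⟨hm, hKle⟩
      have hK1 : 1 ≤ ceilK x m := ceilK_pos hx hm
      have hKj : ceilK x m = (j : Int) := by omega
      have hbr := ceilK_bracket (x := x) (show (0:Int) < m by omega)
      have hscore : ¬ (m * (j : Int) < x) := by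
        rw [← hKj]; nlinarith [hbr.2]
      refine ⟨[], ?_, ?_⟩
      · rw [innerA, if_neg hscore, hKj, Int.toNat_natCast]
      · have : (ceilK x m).toNat = j := by omega
        rw [this, hj, List.drop_length]
        rfl
    · intro hng
      have hscore : m * (j : Int) < x := by
        by_cases hm : 1 ≤ m
        · have hK1 : 1 ≤ ceilK x m := ceilK_pos hx hm
          have hKgt : u.length < (ceilK x m).toNat := by
            rcases Nat.lt_or_ge u.length ((ceilK x m).toNat) with h | h
            · exact h
            · exact absurd ⟨hm, h⟩ hng
          have hbr := ceilK_bracket (x := x) (show (0:Int) < m by omega)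
          have : (j : Int) ≤ ceilK x m - 1 := by omega
          nlinarith [hbr.1]
        · have hm0 : m ≤ 0 := by omega
          have : (0 : Int) ≤ (j : Int) := by positivity
          nlinarith
      rw [innerA, if_pos hscore, if_pos rfl, hj, List.take_length]
    | succ n ihn =>
      intro j a hjn hj1 hjK hsort
      have hjlt : j < u.length := by omega
      have ha : a ≠ [] := by
        intro h
        rw [h] at hsort
        have : u.drop j = [] := hsort.symm
        rw [List.drop_eq_nil_iff] at this
        omega
      by_cases hsc : m * (j : Int) < x
      · -- the loop picks one more element: move to state j + 1
        have hdropc : u.drop j = u[j] :: u.drop (j + 1) := List.drop_eq_getElem_cons hjlt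
        obtain ⟨hmin, hrem, hsor'⟩ := sorted_cons_min a u[j] (u.drop (j + 1)) (by rw [hsort, hdropc])
        have hmem : u[j] ∈ a := by
          have : u[j] ∈ PySem.List.sorted a (fun y => y) false := by
            rw [hsort, hdropc]
            exact List.mem_cons_self
          rwa [PySem.List.mem_sorted] at this
        have herlen : (a.erase u[j]).length + 1 = a.length := by
          have := List.length_erase_of_mem hmem
          have : 1 ≤ a.length := by cases a with | nil => exact absurd rfl ha | cons b r => simp
          omega
        have htake : u.take j ++ [u[j]] = u.take (j + 1) :=
          (List.take_succ_eq_append_getElem hjlt).symm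
        have hmintest : (PySem.List.min? (u.take (j + 1)) (fun y => y)).getD 0 = m := by
          have hu' : u.take (j + 1) = m :: t.take j := by rw [hu]; rfl
          rw [hu']
          exact min_pairwise_cons m (t.take j)
            (by rw [← hu']; exact List.Pairwise.sublist (List.take_sublist _ _) hp)
        have hlen2 : ((u.take (j + 1)).length : Int) = (j : Int) + 1 := by
          rw [List.length_take]
          omega
        have hstep : innerA x (a.length + 1) (u.take j) a (m * (j : Int))
            = innerA x ((a.erase u[j]).length + 1) (u.take (j + 1)) (a.erase u[j])
                (m * ((j : Nat) + 1 : Int)) := by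
          conv_lhs => rw [← herlen, innerA]
          simp only [hmin, hrem, htake]
          rw [if_pos hsc, if_neg ha, hmintest, hlen2]
        have hrec := ihn (j + 1) (a.erase u[j]) (by omega) (by omega)
          (fun hm => by
            have hbr := ceilK_bracket (x := x) (show (0:Int) < m by omega)
            have h2 : x ≤ ceilK x m * m := hbr.2
            push_cast
            nlinarith)
          hsor'
        constructor
        · intro hg
          obtain ⟨a', hrun, hsorta'⟩ := hrec.1 hg
          refine ⟨a', ?_, hsorta'⟩
          rw [hstep]
          rw [← hrun]
          norm_num
        · intro hng
          rw [hstep]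
          have := hrec.2 hng
          rw [← this]
          norm_num
      · -- the team is complete: the loop returns with score ≥ x
        have hm1 : 1 ≤ m := by
          by_contra hm
          have hm0 : m ≤ 0 := by omega
          have : (0:Int) ≤ (j : Int) := by positivity
          nlinarith
        have hK1 : 1 ≤ ceilK x m := ceilK_pos hx hm1
        have hbr := ceilK_bracket (x := x) (show (0:Int) < m by omega)
        have hKj : ceilK x m = (j : Int) := by
          have h1 : (j : Int) ≤ ceilK x m := hjK hm1
          have h2 : ceilK x m ≤ (j : Int) := by nlinarith [hbr.1]
          omega
        have hret : innerA x (a.length + 1) (u.take j) a (m * (j : Int))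
            = (m * (j : Int), u.take j, a, false) := by
          rw [innerA, if_neg hsc]
        constructor
        · intro _
          refine ⟨a, ?_, ?_⟩
          · rw [hret, hKj, Int.toNat_natCast]
          · have : (ceilK x m).toNat = j := by omega
            rw [this, hsort]
        · intro hng
          exact absurd ⟨hm1, by omega⟩ hng


-- the whole outer loop of A computes result + tileSpec, or 0 on a failed tiling
lemma outer_main (x : Int) (hx : 1 ≤ x) :
    ∀ (fuel : Nat) (u a : List Int) (result : Int), u.Pairwise (· ≤ ·) →
      PySem.List.sorted a (fun y => y) false = u → a.length < fuel →
      outerA x fuel a result =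
        (match tileSpec x u with | some c => result + c | none => 0) := by
  intro fuel
  induction fuel with
  | zero => intro u a result _ _ h; omega
  | succ f ih =>
    intro u a result hp hsort hlen
    by_cases ha : a = []
    · subst ha
      have hu : u = [] := by rw [← hsort]; rfl
      subst hu
      rw [outerA, if_pos rfl, tileSpec_nil]
      simp
    · obtain ⟨m, t, rfl⟩ : ∃ m t, u = m :: t := by
        rcases hu : u with _ | ⟨m, t⟩
        · rw [hu] at hsort; exact absurd ((PySem.List.sorted_eq_nil_iff _ _ _).mp hsort) ha
        · exact ⟨m, t, rfl⟩
      have hlen1 : 1 ≤ a.length := by cases a with | nil => exact absurd rfl ha | cons b r => simp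
      have hulen : (m :: t).length = a.length := by
        rw [← hsort, PySem.List.length_sorted]
      obtain ⟨hmin, hrem, hsor'⟩ := sorted_cons_min a m t hsort
      have hm_mem : m ∈ a := by
        have : m ∈ PySem.List.sorted a (fun y => y) false := by rw [hsort]; simp
        rwa [PySem.List.mem_sorted] at this
      have herlen : (a.erase m).length + 1 = a.length := by
        have := List.length_erase_of_mem hm_mem; omega
      -- compute the first step of the inner loop
      have hstep : innerA x (a.length + 1) [] a 0
          = innerA x ((a.erase m).length + 1) ((m :: t).take 1) (a.erase m) (m * (1 : Nat)) := by
        conv_lhs => rw [← herlen, innerA]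
        simp only [hmin, hrem]
        rw [if_pos (by omega : (0:Int) < x), if_neg ha]
        simp [PySem.List.min?_id_cons]
      -- analyse the rest of the inner loop
      have hinner := inner_main x hx (m :: t) m t rfl hp ((m :: t).length - 1) 1 (a.erase m)
        (by omega) le_rfl
        (fun hm => by exact_mod_cast ceilK_pos hx hm)
        (by rw [hsor']; rfl)
      rw [outerA, if_neg ha, hstep]
      by_cases hg : 1 ≤ m ∧ (ceilK x m).toNat ≤ (m :: t).length
      · obtain ⟨a', hrun, hsorta'⟩ := hinner.1 hg
        rw [hrun]
        have hK1 : 1 ≤ ceilK x m := ceilK_pos hx hg.1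
        have hbr := ceilK_bracket (x := x) (show (0:Int) < m by omega)
        have hscore : m * ceilK x m ≥ x := by nlinarith [hbr.2]
        simp only [if_pos hscore, Bool.false_eq_true, if_false]
        have ha'len : a'.length = (m :: t).length - (ceilK x m).toNat := by
          rw [← PySem.List.length_sorted a' (fun y => y) false, hsorta', List.length_drop]
        have hK1n : 1 ≤ (ceilK x m).toNat := by omega
        have ha'f : a'.length < f := by
          have h1 : a'.length + 1 ≤ a.length := by rw [ha'len]; omega
          omega
        rw [ih ((m :: t).drop (ceilK x m).toNat) a' (result + 1)
          (List.Pairwise.sublist (List.drop_sublist _ _) hp) hsorta' ha'f]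
        have hguard : 1 ≤ m ∧ 1 ≤ ceilK x m ∧ (ceilK x m).toNat ≤ t.length + 1 := by
          refine ⟨hg.1, hK1, ?_⟩
          have := hg.2; simpa using this
        rw [tileSpec, if_pos hguard]
        cases tileSpec x ((m :: t).drop (ceilK x m).toNat) with
        | none => rfl
        | some c =>
          simp only [Option.map_some]
          show result + 1 + c = result + (1 + c)
          ring
      · rw [hinner.2 hg]
        have hscore : ¬ (m * ((m :: t).length : Int) ≥ x) := by
          by_cases hm : 1 ≤ m
          · have hKgt : ((m :: t).length : Nat) < (ceilK x m).toNat := by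
              rcases Nat.lt_or_ge ((m :: t).length) ((ceilK x m).toNat) with h | h
              · exact h
              · exact absurd ⟨hm, h⟩ hg
            have hK1 : 1 ≤ ceilK x m := ceilK_pos hx hm
            have hbr := ceilK_bracket (x := x) (show (0:Int) < m by omega)
            have : ((m :: t).length : Int) ≤ ceilK x m - 1 := by omega
            nlinarith [hbr.1]
          · have hm0 : m ≤ 0 := by omega
            have hl0 : (0 : Int) ≤ ((m :: t).length : Int) := by positivity
            nlinarith
        simp only [if_neg hscore, if_true]
        rw [ih [] [] 0 List.Pairwise.nil rfl (by simp only [List.length_nil]; omega), tileSpec_nil]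
        have hnone : tileSpec x (m :: t) = none := by
          rw [tileSpec, if_neg ?_]
          intro hgd
          exact hg ⟨hgd.1, by simpa using hgd.2.2⟩
        rw [hnone]
        simp

lemma tileAlt_stop (a : List Int) (x : Int) (fuel : Nat) (i cnt : Int)
    (h : ¬ i < (a.length : Int)) : tileAlt a x fuel i cnt = (i, cnt, true) := by
  cases fuel with
  | zero => rfl
  | succ f => simp [tileAlt, h]

-- B's inner loop agrees with tileSpec on suffixes
lemma tile_alt_main (x : Int) (hx : 1 ≤ x) (u : List Int) :
    ∀ n (s : Nat) (cnt : Int) (fuel : Nat), s + n = u.length → n < fuel →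
      ((∀ c, tileSpec x (u.drop s) = some c →
         tileAlt u x fuel (s : Int) cnt = ((u.length : Int), cnt + c, true)) ∧
       (tileSpec x (u.drop s) = none →
         ¬ ((tileAlt u x fuel (s : Int) cnt).2.2 = true ∧
            (tileAlt u x fuel (s : Int) cnt).1 = (u.length : Int)))) := by
  intro n
  induction n using Nat.strong_induction_on with
  | _ n ihn =>
  intro s cnt fuel hs hf
  rcases Nat.eq_zero_or_pos n with rfl | hnpos
  · -- s = u.length: the loop exits immediately, tileSpec [] = some 0
    have hsl : s = u.length := by omega
    have hdrop : u.drop s = [] := by rw [hsl]; simp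
    have hstop : tileAlt u x fuel (s : Int) cnt = ((s : Int), cnt, true) :=
      tileAlt_stop u x fuel _ _ (by omega)
    constructor
    · intro c hc
      rw [hdrop, tileSpec_nil] at hc
      obtain rfl : (0 : Int) = c := by simpa using hc
      rw [hstop, hsl]; simp
    · intro hc; rw [hdrop, tileSpec_nil] at hc; simp at hc
  · -- s < u.length: one iteration of the loop
    have hslt : s < u.length := by omega
    obtain ⟨f, rfl⟩ : ∃ f, fuel = f + 1 := ⟨fuel - 1, by omega⟩
    have hi : (s : Int) < (u.length : Int) := by exact_mod_cast hslt
    have hget : (PySem.List.pyGet? u (s : Int)).getD 0 = u[s] := by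
      rw [PySem.List.pyGet?_natCast, List.getElem?_eq_getElem hslt, Option.getD_some]
    have hdropc : u.drop s = u[s] :: u.drop (s + 1) := List.drop_eq_getElem_cons hslt
    by_cases hai : u[s] ≤ 0
    · -- break: no team can ever close
      have hrun : tileAlt u x (f + 1) (s : Int) cnt = ((s : Int), cnt, false) := by
        rw [tileAlt]; rw [if_pos hi, hget, if_pos hai]
      have hnone : tileSpec x (u.drop s) = none := by
        rw [hdropc, tileSpec, if_neg (fun hg => absurd hg.1 (by omega))]
      constructor
      · intro c hc; rw [hnone] at hc; simp at hc
      · intro _; rw [hrun]; simp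
    · have hai1 : 1 ≤ u[s] := by omega
      set K : Int := ceilK x u[s] with hK
      have hK1 : 1 ≤ K := ceilK_pos hx hai1
      have hstep : tileAlt u x (f + 1) (s : Int) cnt
          = tileAlt u x f ((s : Int) + K) (cnt + 1) := by
        rw [tileAlt]; rw [if_pos hi, hget, if_neg (by omega), hK, ceilK]
      by_cases hrange : K.toNat ≤ u.length - s
      · -- the jump stays inside: recurse
        have hcast : (s : Int) + K = ((s + K.toNat : Nat) : Int) := by
          push_cast; omega
        have hrec := ihn (n - K.toNat) (by omega) (s + K.toNat) (cnt + 1) f (by omega) (by omega)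
        have hdd : u.drop (s + K.toNat) = (u.drop s).drop K.toNat := by
          rw [List.drop_drop]
        have hguard : 1 ≤ u[s] ∧ 1 ≤ ceilK x u[s] ∧ (ceilK x u[s]).toNat ≤ (u.drop (s+1)).length + 1 := by
          refine ⟨hai1, hK1, ?_⟩
          rw [List.length_drop]; omega
        have hspec : tileSpec x (u.drop s)
            = (tileSpec x (u.drop (s + K.toNat))).map (1 + ·) := by
          rw [hdropc, tileSpec, if_pos hguard, ← hdropc, ← hK, hdd, List.drop_drop]
        constructor
        · intro c hc
          rw [hspec] at hc
          obtain ⟨c', hc', rfl⟩ := Option.map_eq_some_iff.mp hc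
          rw [hstep, hcast, hrec.1 c' hc']
          ring_nf
        · intro hc
          rw [hspec, Option.map_eq_none_iff] at hc
          rw [hstep, hcast]
          exact hrec.2 hc
      · -- the jump overshoots: loop exits with i ≠ len
        have hover : (u.length : Int) < (s : Int) + K := by
          have : (u.length - s : Nat) < K.toNat := by omega
          omega
        have hrun : tileAlt u x (f + 1) (s : Int) cnt = ((s : Int) + K, cnt + 1, true) := by
          rw [hstep, tileAlt_stop u x f _ _ (by omega)]
        have hnone : tileSpec x (u.drop s) = none := by
          rw [hdropc, tileSpec, if_neg ?_]
          intro hg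
          have := hg.2.2
          rw [List.length_drop] at this
          omega
        constructor
        · intro c hc; rw [hnone] at hc; simp at hc
        · intro _; rw [hrun]; simp; omega
  

-- B's scan over range(n) returns firstTile of the corresponding suffix
lemma scan_main (x : Int) (hx : 1 ≤ x) (u : List Int) :
    ∀ n (s : Nat), s + n = u.length →
      scanAlt u x (PySem.List.pyRange (s : Int) (u.length : Int) 1) = firstTile x (u.drop s) := by
  intro n
  induction n with
  | zero =>
    intro s hs
    have hsl : s = u.length := by omega
    have hr : PySem.List.pyRange (s : Int) (u.length : Int) 1 = [] := by
      rw [hsl]; simp [pysem]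
    rw [hr, hsl, List.drop_length, firstTile_nil]
    rfl
  | succ n ihn =>
    intro s hs
    have hslt : s < u.length := by omega
    have hi : (s : Int) < (u.length : Int) := by exact_mod_cast hslt
    rw [PySem.List.pyRange_one_cons hi]
    have hT := tile_alt_main x hx u (n + 1) s 0 (u.length + 1) hs (by omega)
    cases htile : tileSpec x (u.drop s) with
    | some c =>
      rw [scanAlt, hT.1 c htile, firstTile_some htile]
      simp
    | none =>
      rw [scanAlt, if_neg (hT.2 htile)]
      have : (s : Int) + 1 = ((s + 1 : Nat) : Int) := by push_cast; ring
      rw [this, ihn (s + 1) (by omega), firstTile_none htile, List.tail_drop]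

lemma alt_eq (x : Int) (hx : 1 ≤ x) (l : List Int) :
    team_a_team_alt l x = firstTile x (PySem.List.sorted l (fun y => y) false) := by
  unfold team_a_team_alt
  have := scan_main x hx (PySem.List.sorted l (fun y => y) false)
    (PySem.List.sorted l (fun y => y) false).length 0 (by omega)
  simpa using this

lemma a_eq (x : Int) (hx : 1 ≤ x) : ∀ (l : List Int),
    team_a_team l x = firstTile x (PySem.List.sorted l (fun y => y) false) := by
  have H : ∀ (N : Nat) (l : List Int), l.length ≤ N →
      team_a_team l x = firstTile x (PySem.List.sorted l (fun y => y) false) := by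
    intro N
    induction N with
    | zero =>
      intro l hl
      have : l = [] := by cases l with | nil => rfl | cons a t => simp at hl
      subst this
      rw [team_a_team]
      simp [PySem.List.sorted, firstTile_nil]
    | succ N ih =>
      intro l hl
      by_cases hnil : l = []
      · subst hnil
        rw [team_a_team]
        simp [PySem.List.sorted, firstTile_nil]
      · obtain ⟨m, t, hst⟩ : ∃ m t, PySem.List.sorted l (fun y => y) false = m :: t := by
          rcases hs : PySem.List.sorted l (fun y => y) false with _ | ⟨m, t⟩
          · exact absurd ((PySem.List.sorted_eq_nil_iff _ _ _).mp hs) hnil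
          · exact ⟨m, t, rfl⟩
        have hp : (m :: t).Pairwise (· ≤ ·) := by
          have := PySem.List.sorted_pairwise l (fun y => y)
          rwa [hst] at this
        have hlen0 : ¬ l.length = 0 := by simpa using hnil
        obtain ⟨hmin, hrem, hsor⟩ := sorted_cons_min l m t hst
        rw [team_a_team]
        simp only [hlen0, dite_false]
        rw [outer_main x hx (l.length + 1) (m :: t) l 0 hp hst (by omega)]
        cases htile : tileSpec x (m :: t) with
        | some c =>
          have hc : 1 ≤ c := tileSpec_cons_pos htile
          rw [hst, firstTile_some htile]
          simp only [zero_add]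
          rw [if_neg (by omega : ¬ c = 0)]
        | none =>
          have hlen : (l.erase m).length ≤ N := by
            have := List.length_erase_of_mem (a := m) (l := l)
            have hm_mem : m ∈ l := by
              have : m ∈ PySem.List.sorted l (fun y => y) false := by rw [hst]; simp
              rwa [PySem.List.mem_sorted] at this
            have := List.length_erase_of_mem hm_mem
            omega
          rw [hmin, hrem]
          simp only [if_pos rfl]
          rw [ih (l.erase m) hlen, hsor, hst, firstTile_none htile]
          rfl
  exact fun l => H l.length l le_rfl

-- ===== VERDICT (by name: the statement is the Claim_ definition above) =====
theorem team_a_team_spec : Claim_equal_team_a_team := by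
  intro l x _ hpre
  unfold Spec_team_a_team
  rcases hpre with rfl | hx
  · rw [team_a_team]; simp [team_a_team_alt, PySem.List.sorted, PySem.List.pyRange, scanAlt]
  · rw [a_eq x hx l, alt_eq x hx l]
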